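-- pv_equiv track=rewrite | github.com/farizrahman4u/QA | api.py | find
-- ===== SOURCE A (Python) =====
-- def find(x, doc):
--     # Since some characters are removed during
--     # different stages of preprocessing, it is
--     # hard to keep track of the index map of
--     # characters. (We have to return the indices
--     # of start and characters of answers, not the
--     # answers themselves.) So instead of maintaining
--     # an index map, we do a soft search for the final
--     # answer in the original document.
--     # Slightly inefficient (O(n^4)).
--     # e.g: find('abcd', 'qwerty,ab,cd,xyz') => (8, 13)
--     start = 0
--     end = 0
--     m = len(x)
--     n = len(doc)
--     best_dist = n
--     for i in range(n):
--         for j in range(i + int(m / 2), min(n, i + m * 2)):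
--             b = doc[i : j]
--             a = x
--             if len(a) > len(b):
--                 a, b = b, a
--             d1 = list(range(len(a) + 1))
--             for ib, cb in enumerate(b):
--                 d2 = [ib + 1]
--                 for ia, ca in enumerate(a):
--                     if ca == cb:
--                         d2.append(d1[ia])
--                     else:
--                         d2.append(1 + min((d1[ia], d1[ia + 1], d2[-1])))
--                 d1 = d2
--             dist = d1[-1]
--             if  dist < best_dist:
--                 best_dist = dist
--                 start = i
--                 end = j
--     return start, end
-- ===== SOURCE B (Python) =====
-- def find(x, doc):
--     # Incremental edit-distance: for each start i, extend the candidate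
--     # substring one character at a time, updating a single DP row over x
--     # (O(n*m^2) instead of recomputing a full DP table per (i, j)).
--     m = len(x)
--     n = len(doc)
--     best = n
--     start = 0
--     end = 0
--     half = m // 2
--     for i in range(n):
--         hi = min(n, i + 2 * m)
--         row = list(range(m + 1))
--         for L, c in enumerate(doc[i:hi]):
--             if L >= half and row[m] < best:
--                 best = row[m]
--                 start = i
--                 end = i + L
--             new = [L + 1]
--             for cx, up_left, up in zip(x, row, row[1:]):
--                 if cx == c:
--                     new.append(up_left)
--                 else:
--                     new.append(1 + min(up_left, up, new[-1]))
--             row = new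
--     return start, end
-- ===== Notes on version B (the rewrite author's own statement) =====
-- stated objective: faster
-- what changed: Instead of recomputing a full edit-distance DP table for every candidate (i,j) substring (with a length-based operand swap), B keeps one DP row over x per start i and extends the candidate substring one character at a time, reading the distance off the row end in O(m) per j.
import Mathlib
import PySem

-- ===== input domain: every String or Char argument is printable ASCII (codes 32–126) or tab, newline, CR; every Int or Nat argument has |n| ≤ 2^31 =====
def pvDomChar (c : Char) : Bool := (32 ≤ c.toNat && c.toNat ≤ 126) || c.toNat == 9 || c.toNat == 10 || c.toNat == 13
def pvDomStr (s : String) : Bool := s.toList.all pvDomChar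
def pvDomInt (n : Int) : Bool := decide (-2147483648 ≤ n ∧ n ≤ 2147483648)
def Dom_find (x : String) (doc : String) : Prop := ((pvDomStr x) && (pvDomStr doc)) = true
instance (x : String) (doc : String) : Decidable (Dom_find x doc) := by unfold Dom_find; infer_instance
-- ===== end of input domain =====

-- B replaces A's per-(i,j) full edit-distance DP (with operand swap) by one DP row per
-- start i, extended one character per j: O(n*m^2) instead of O(n*m^3); return value only.

-- ===== PORT A =====
-- inner loop 'for ia, ca in enumerate(a)' building d2 (d1[ia], d1[ia+1], d2[-1] lookups are
-- always in range in A, so pyGetD with default 0 is exact)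
def levLoopA (a : List Char) (d1 : List Int) (ib : Int) (cb : Char) : List Int :=
  (PySem.List.enumerate a).foldl
    (fun (d2 : List Int) (q : Int × Char) =>
      if q.2 = cb then d2 ++ [PySem.List.pyGetD d1 q.1 0]
      else d2 ++ [1 + min (PySem.List.pyGetD d1 q.1 0)
            (min (PySem.List.pyGetD d1 (q.1 + 1) 0) (PySem.List.pyGetD d2 (-1) 0))])
    [ib + 1]

-- 'for ib, cb in enumerate(b): … d1 = d2', then 'dist = d1[-1]'
def distLoopA (a b : List Char) : Int :=
  PySem.List.pyGetD
    ((PySem.List.enumerate b).foldl (fun d1 p => levLoopA a d1 p.1 p.2)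
      ((List.range (a.length + 1)).map (fun (k : Nat) => (k : Int)))) (-1) 0

-- body of the j loop
def tryA (xs ds : List Char) (i : Int) (s : Int × Int × Int) (j : Int) : Int × Int × Int :=
  let b := PySem.List.slice ds (some i) (some j)
  let a := xs
  let p := if b.length < a.length then (b, a) else (a, b)   -- if len(a) > len(b): a, b = b, a
  let dist := distLoopA p.1 p.2
  if dist < s.1 then (dist, i, j) else s

def find (x : String) (doc : String) : List Int :=
  let xs := x.toList
  let ds := doc.toList
  let m : Nat := xs.length
  let n : Nat := ds.length
  -- int(m / 2) = m // 2 here (m is a nonnegative machine-size length, float division is exact)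
  let st := (PySem.List.pyRange 0 (n : Int) 1).foldl
    (fun (s : Int × Int × Int) (i : Int) =>
      (PySem.List.pyRange (i + (m / 2 : Nat)) (min (n : Int) (i + (m : Int) * 2)) 1).foldl
        (tryA xs ds i) s)
    ((n : Int), 0, 0)
  [st.2.1, st.2.2]

-- ===== PORT B =====
-- 'new = [L+1]; for cx, up_left, up in zip(x, row, row[1:]): …'
def rowLoopB (xs : List Char) (row : List Int) (L : Int) (c : Char) : List Int :=
  (xs.zip (row.zip row.tail)).foldl
    (fun (nw : List Int) (q : Char × Int × Int) =>
      if q.1 = c then nw ++ [q.2.1]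
      else nw ++ [1 + min q.2.1 (min q.2.2 (PySem.List.pyGetD nw (-1) 0))])
    [L + 1]

-- body of 'for L, c in enumerate(doc[i:hi])'
def stepB (xs : List Char) (half m : Nat) (i : Int) (t : (Int × Int × Int) × List Int)
    (p : Int × Char) : (Int × Int × Int) × List Int :=
  let s := t.1
  let row := t.2
  let s := if (half : Int) ≤ p.1 ∧ PySem.List.pyGetD row (m : Int) 0 < s.1 then
      (PySem.List.pyGetD row (m : Int) 0, i, i + p.1)
    else s
  (s, rowLoopB xs row p.1 p.2)

def find_alt (x : String) (doc : String) : List Int :=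
  let xs := x.toList
  let ds := doc.toList
  let m : Nat := xs.length
  let n : Nat := ds.length
  let half : Nat := m / 2
  let st := (PySem.List.pyRange 0 (n : Int) 1).foldl
    (fun (s : Int × Int × Int) (i : Int) =>
      let hi : Int := min (n : Int) (i + 2 * (m : Int))
      let row0 : List Int := (List.range (m + 1)).map (fun (k : Nat) => (k : Int))
      ((PySem.List.enumerate (PySem.List.slice ds (some i) (some hi))).foldl
        (stepB xs half m i) (s, row0)).1)
    ((n : Int), 0, 0)
  [st.2.1, st.2.2]

-- ===== PRECONDITION & SPEC =====
def Spec_find (x : String) (doc : String) (out : List Int) : Prop := out = find_alt x doc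
instance (x : String) (doc : String) (out : List Int) : Decidable (Spec_find x doc out) := by unfold Spec_find; infer_instance

-- ===== CLAIM (what is proved, stated in full; the proofs are below) =====
def Claim_equal_find : Prop := ∀ (x : String) (doc : String), Dom_find x doc → Spec_find x doc (find x doc)

-- ===== LEMMAS AND PROOFS =====

def levF : List Char → List Char → Int
  | [], b => (b.length : Int)
  | _ :: a, [] => (a.length : Int) + 1
  | ca :: a, cb :: b =>
      if ca = cb then levF a b
      else 1 + min (levF a b) (min (levF (ca :: a) b) (levF a (cb :: b)))
termination_by a b => a.length + b.length
decreasing_by all_goals simp [List.length_cons] <;> omega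

theorem levF_nil_right (a : List Char) : levF a [] = (a.length : Int) := by
  cases a <;> simp [levF]

theorem levF_symm (a : List Char) : ∀ b, levF a b = levF b a := by
  induction a with
  | nil => intro b; simp [levF, levF_nil_right]
  | cons ca a ih =>
    intro b
    induction b with
    | nil => simp [levF, levF_nil_right]
    | cons cb b ihb =>
      by_cases h : ca = cb
      · subst h; simp [levF, ih b]
      · have h' : ¬ cb = ca := fun e => h e.symm
        simp only [levF, if_neg h, if_neg h']
        rw [ih b, ih (cb :: b), ihb]
        omega

def prefRow : List Char → List Char → List Char → List Int
  | R, [], rb => [levF R rb]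
  | R, ca :: a, rb => levF R rb :: prefRow (ca :: R) a rb

theorem prefRow_ne_nil (R a rb) : prefRow R a rb ≠ [] := by
  cases a <;> simp [prefRow]

theorem prefRow_headD (R a rb) : (prefRow R a rb).headD 0 = levF R rb := by
  cases a <;> simp [prefRow]

theorem prefRow_length (a : List Char) : ∀ R rb, (prefRow R a rb).length = a.length + 1 := by
  induction a with
  | nil => intro R rb; simp [prefRow]
  | cons ca a ih => intro R rb; simp [prefRow, ih]

theorem getLastD_cons_of_ne_nil (x d : Int) (l : List Int) (h : l ≠ []) :
    (x :: l).getLastD d = l.getLastD d := by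
  cases l with
  | nil => exact absurd rfl h
  | cons y t => simp [List.getLastD_eq_getLast?, List.getLast?_cons]

theorem getLast_eq_getLastD0 (l : List Int) (h : l ≠ []) : l.getLast h = l.getLastD 0 := by
  rw [List.getLastD_eq_getLast?, List.getLast?_eq_some_getLast h, Option.getD_some]

theorem prefRow_getLastD (a : List Char) : ∀ R rb (d : Int),
    (prefRow R a rb).getLastD d = levF (a.reverse ++ R) rb := by
  induction a with
  | nil => intro R rb d; simp [prefRow]
  | cons ca a ih =>
    intro R rb d
    have h := prefRow_ne_nil (ca :: R) a rb
    show (levF R rb :: prefRow (ca :: R) a rb).getLastD d = _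
    rw [getLastD_cons_of_ne_nil _ _ _ h, ih]
    simp

def stepRow : List Char → List Int → Int → Char → List Int
  | [], _, _, _ => []
  | _ :: _, [], _, _ => []
  | ca :: a, p0 :: rest, last, cb =>
      let v := if ca = cb then p0 else 1 + min p0 (min (rest.headD 0) last)
      v :: stepRow a rest v cb

theorem stepRow_correct (a : List Char) : ∀ (R rb : List Char) (cb : Char),
    levF R (cb :: rb) :: stepRow a (prefRow R a rb) (levF R (cb :: rb)) cb
      = prefRow R a (cb :: rb) := by
  induction a with
  | nil => intro R rb cb; simp [prefRow, stepRow]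
  | cons ca a ih =>
    intro R rb cb
    have hv : (if ca = cb then levF R rb
        else 1 + min (levF R rb) (min ((prefRow (ca :: R) a rb).headD 0) (levF R (cb :: rb))))
        = levF (ca :: R) (cb :: rb) := by
      rw [prefRow_headD]; simp [levF]
    simp only [prefRow, stepRow, hv]
    rw [show prefRow (ca :: R) a (cb :: rb)
        = levF (ca :: R) (cb :: rb) :: stepRow a (prefRow (ca :: R) a rb) (levF (ca :: R) (cb :: rb)) cb
        from (ih (ca :: R) rb cb).symm]

theorem innerA_fold (d1 : List Int) (cb : Char) (a : List Char) : ∀ (pos : Nat) (d2 : List Int),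
    d2 ≠ [] → pos + a.length < d1.length →
    (PySem.List.enumerate a (pos : Int)).foldl
      (fun (d2 : List Int) (q : Int × Char) =>
        if q.2 = cb then d2 ++ [PySem.List.pyGetD d1 q.1 0]
        else d2 ++ [1 + min (PySem.List.pyGetD d1 q.1 0)
              (min (PySem.List.pyGetD d1 (q.1 + 1) 0) (PySem.List.pyGetD d2 (-1) 0))]) d2
      = d2 ++ stepRow a (d1.drop pos) (d2.getLastD 0) cb := by
  induction a with
  | nil =>
    intro pos d2 h hl
    simp [PySem.List.enumerate_nil, stepRow]
  | cons ca a ih =>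
    intro pos d2 h hl
    have hpos : pos < d1.length := by simp at hl; omega
    have hdrop : d1.drop pos = d1[pos] :: d1.drop (pos + 1) := List.drop_eq_getElem_cons hpos
    have hget : PySem.List.pyGetD d1 (pos : Int) 0 = d1[pos] := by
      rw [PySem.List.pyGetD_natCast, List.getD_eq_getElem d1 0 hpos]
    have hget1 : PySem.List.pyGetD d1 ((pos : Int) + 1) 0 = (d1.drop (pos + 1)).headD 0 := by
      have : ((pos : Int) + 1) = ((pos + 1 : Nat) : Int) := by push_cast; ring
      rw [this, PySem.List.pyGetD_natCast]
      rcases Nat.lt_or_ge (pos + 1) d1.length with hh | hh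
      · rw [List.getD_eq_getElem d1 0 hh]
        rw [List.drop_eq_getElem_cons hh]; rfl
      · rw [List.getD_eq_default _ _ hh, List.drop_eq_nil_of_le hh]; rfl
    have hlast : PySem.List.pyGetD d2 (-1) 0 = d2.getLastD 0 := by
      rw [PySem.List.pyGetD_neg_one _ _ h]
      cases d2 with
      | nil => exact absurd rfl h
      | cons y t => simp [List.getLastD_eq_getLast?, List.getLast?_eq_some_getLast]
    rw [PySem.List.enumerate_cons, List.foldl_cons]
    set v : Int := if ca = cb then d1[pos]
      else 1 + min d1[pos] (min ((d1.drop (pos + 1)).headD 0) (d2.getLastD 0)) with hv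
    have hstep : (if ca = cb then d2 ++ [PySem.List.pyGetD d1 (pos : Int) 0]
        else d2 ++ [1 + min (PySem.List.pyGetD d1 (pos : Int) 0)
          (min (PySem.List.pyGetD d1 ((pos : Int) + 1) 0) (PySem.List.pyGetD d2 (-1) 0))])
        = d2 ++ [v] := by
      rw [hv, hget, hget1, hlast]
      split <;> rfl
    simp only [hstep]
    rw [show ((pos : Int) + 1) = ((pos + 1 : Nat) : Int) by push_cast; ring]
    rw [ih (pos + 1) (d2 ++ [v]) (by simp) (by simp at hl ⊢; omega)]
    rw [hdrop]
    show d2 ++ [v] ++ stepRow a (d1.drop (pos + 1)) ((d2 ++ [v]).getLastD 0) cb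
      = d2 ++ (_ :: stepRow a (d1.drop (pos + 1)) _ cb)
    rw [List.getLastD_concat, List.append_assoc]
    simp only [List.singleton_append, hv]

theorem prefRow_rb_nil (a : List Char) : ∀ R : List Char,
    prefRow R a [] = (List.range (a.length + 1)).map (fun k => ((R.length + k : Nat) : Int)) := by
  induction a with
  | nil => intro R; simp [prefRow, levF_nil_right]
  | cons ca a ih =>
    intro R
    show levF R [] :: prefRow (ca :: R) a [] = _
    rw [levF_nil_right, ih (ca :: R)]
    apply List.ext_getElem
    · simp
    · intro i h1 h2
      cases i with
      | zero => simp
      | succ i =>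
        simp only [List.getElem_cons_succ, List.getElem_map, List.getElem_range,
          List.length_cons]
        omega

theorem row_init (a : List Char) :
    (List.range (a.length + 1)).map (fun (k : Nat) => (k : Int)) = prefRow [] a [] := by
  rw [prefRow_rb_nil]
  apply List.map_congr_left
  intro k hk
  simp

theorem outerA_fold (a : List Char) (b : List Char) : ∀ rb : List Char,
    (PySem.List.enumerate b (rb.length : Int)).foldl (fun d1 p => levLoopA a d1 p.1 p.2)
      (prefRow [] a rb)
      = prefRow [] a (b.reverse ++ rb) := by
  induction b with
  | nil => intro rb; simp [PySem.List.enumerate_nil]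
  | cons cb b ih =>
    intro rb
    rw [PySem.List.enumerate_cons, List.foldl_cons]
    have hone : levLoopA a (prefRow [] a rb) (rb.length : Int) cb = prefRow [] a (cb :: rb) := by
      unfold levLoopA
      rw [show PySem.List.enumerate a = PySem.List.enumerate a (((0:Nat)) : Int) by norm_num]
      rw [innerA_fold (prefRow [] a rb) cb a 0 [(rb.length : Int) + 1] (by simp)
        (by rw [prefRow_length]; omega)]
      have h1 : ((rb.length : Int) + 1) = levF [] (cb :: rb) := by
        simp [levF]
      simp only [List.drop_zero, List.singleton_append, h1]
      exact stepRow_correct a [] rb cb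
    rw [hone]
    rw [show (rb.length : Int) + 1 = (((cb :: rb).length : Nat) : Int) by simp]
    rw [ih (cb :: rb)]
    simp

theorem distLoopA_eq (a b : List Char) : distLoopA a b = levF a.reverse b.reverse := by
  unfold distLoopA
  rw [row_init a]
  rw [show PySem.List.enumerate b = PySem.List.enumerate b ((([] : List Char).length : Nat) : Int) by norm_num]
  rw [outerA_fold a b []]
  rw [PySem.List.pyGetD_neg_one _ _ (prefRow_ne_nil _ _ _)]
  rw [getLast_eq_getLastD0 _ (prefRow_ne_nil _ _ _), prefRow_getLastD]
  simp

theorem tryA_eq (xs ds : List Char) (i j : Int) (s : Int × Int × Int) :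
    tryA xs ds i s j =
      (if levF xs.reverse (PySem.List.slice ds (some i) (some j)).reverse < s.1
        then (levF xs.reverse (PySem.List.slice ds (some i) (some j)).reverse, i, j) else s) := by
  unfold tryA
  by_cases h : (PySem.List.slice ds (some i) (some j)).length < xs.length
  · simp only [if_pos h, distLoopA_eq, levF_symm]
  · simp only [if_neg h, distLoopA_eq]

theorem innerB_fold (c : Char) (a : List Char) : ∀ (p nw : List Int),
    nw ≠ [] → a.length < p.length →
    (a.zip (p.zip p.tail)).foldl
      (fun (nw : List Int) (q : Char × Int × Int) =>
        if q.1 = c then nw ++ [q.2.1]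
        else nw ++ [1 + min q.2.1 (min q.2.2 (PySem.List.pyGetD nw (-1) 0))]) nw
      = nw ++ stepRow a p (nw.getLastD 0) c := by
  induction a with
  | nil => intro p nw h hl; simp [stepRow]
  | cons ca a ih =>
    intro p nw h hl
    match p with
    | [] => simp at hl
    | [p0] => simp at hl
    | p0 :: p1 :: ps =>
      have hlast : PySem.List.pyGetD nw (-1) 0 = nw.getLastD 0 := by
        rw [PySem.List.pyGetD_neg_one _ _ h, getLast_eq_getLastD0]
      show List.foldl _ (if ca = c then nw ++ [p0]
          else nw ++ [1 + min p0 (min p1 (PySem.List.pyGetD nw (-1) 0))]) _ = _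
      set v : Int := if ca = c then p0 else 1 + min p0 (min p1 (nw.getLastD 0)) with hv
      have hstep : (if ca = c then nw ++ [p0]
          else nw ++ [1 + min p0 (min p1 (PySem.List.pyGetD nw (-1) 0))]) = nw ++ [v] := by
        rw [hv, hlast]; split <;> rfl
      rw [hstep]
      have hz : List.zipWith Prod.mk a (List.zipWith Prod.mk (p1 :: ps) ps)
          = a.zip ((p1 :: ps).zip (p1 :: ps).tail) := rfl
      rw [hz, ih (p1 :: ps) (nw ++ [v]) (by simp) (by simp at hl ⊢; omega)]
      rw [List.getLastD_concat, List.append_assoc]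
      show nw ++ ([v] ++ stepRow a (p1 :: ps) v c) = nw ++ (_ :: stepRow a (p1 :: ps) _ c)
      simp only [List.singleton_append, hv]
      rfl

theorem rowLoopB_eq (xs rb : List Char) (c : Char) :
    rowLoopB xs (prefRow [] xs rb) ((rb.length : Nat) : Int) c = prefRow [] xs (c :: rb) := by
  unfold rowLoopB
  rw [innerB_fold c xs (prefRow [] xs rb) [(rb.length : Int) + 1] (by simp)
    (by rw [prefRow_length]; omega)]
  have h1 : ((rb.length : Int) + 1) = levF [] (c :: rb) := by simp [levF]
  have hls : ([(rb.length : Int) + 1] : List Int).getLastD 0 = (rb.length : Int) + 1 := by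
    rfl
  rw [hls, List.singleton_append, h1]
  exact stepRow_correct xs [] rb c

theorem prefRow_read (xs rb : List Char) :
    PySem.List.pyGetD (prefRow [] xs rb) ((xs.length : Nat) : Int) 0 = levF xs.reverse rb := by
  rw [PySem.List.pyGetD_natCast]
  have hlen : (prefRow [] xs rb).length = xs.length + 1 := prefRow_length xs [] rb
  have hne : prefRow [] xs rb ≠ [] := prefRow_ne_nil _ _ _
  have : (prefRow [] xs rb).getD xs.length 0 = (prefRow [] xs rb).getLastD 0 := by
    rw [List.getD_eq_getElem _ 0 (by omega), List.getLastD_eq_getLast? ,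
      List.getLast?_eq_some_getLast hne, Option.getD_some, List.getLast_eq_getElem]
    congr 1
    omega
  rw [this, prefRow_getLastD]
  simp

def sScan (xs : List Char) (half : Nat) (i : Int) : List Char → List Char → (Int × Int × Int) → (Int × Int × Int)
  | [], _, s => s
  | c :: w, rb, s =>
      sScan xs half i w (c :: rb)
        (if (half : Int) ≤ ((rb.length : Nat) : Int) ∧ levF xs.reverse rb < s.1
          then (levF xs.reverse rb, i, i + ((rb.length : Nat) : Int)) else s)

theorem B_scan (xs : List Char) (half : Nat) (i : Int) (w : List Char) :
    ∀ (rb : List Char) (s : Int × Int × Int),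
    (PySem.List.enumerate w ((rb.length : Nat) : Int)).foldl (stepB xs half xs.length i)
      (s, prefRow [] xs rb)
    = (sScan xs half i w rb s, prefRow [] xs (w.reverse ++ rb)) := by
  induction w with
  | nil => intro rb s; simp [PySem.List.enumerate_nil, sScan]
  | cons c w ih =>
    intro rb s
    rw [PySem.List.enumerate_cons, List.foldl_cons]
    have hstep : stepB xs half xs.length i (s, prefRow [] xs rb) (((rb.length : Nat) : Int), c)
        = ((if (half : Int) ≤ ((rb.length : Nat) : Int) ∧ levF xs.reverse rb < s.1
            then (levF xs.reverse rb, i, i + ((rb.length : Nat) : Int)) else s),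
           prefRow [] xs (c :: rb)) := by
      unfold stepB
      dsimp only
      rw [prefRow_read, rowLoopB_eq]
    rw [hstep,
      show ((rb.length : Nat) : Int) + 1 = (((c :: rb).length : Nat) : Int) by simp,
      ih (c :: rb) _]
    rw [sScan]
    simp

theorem sScan_eq_fold (xs : List Char) (half : Nat) (i : Int) (w0 : List Char) :
    ∀ (w rc : List Char) (s : Int × Int × Int), rc.reverse ++ w = w0 →
    sScan xs half i w rc s
    = (PySem.List.pyRange (max (i + (half : Int)) (i + ((rc.length : Nat) : Int)))
        (i + ((w0.length : Nat) : Int)) 1).foldl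
        (fun s j => if levF xs.reverse ((w0.take (j - i).toNat).reverse) < s.1
          then (levF xs.reverse ((w0.take (j - i).toNat).reverse), i, j) else s) s := by
  intro w
  induction w with
  | nil =>
    intro rc s hrc
    have hlen : rc.length = w0.length := by
      rw [← hrc]; simp
    rw [PySem.List.pyRange_one_eq_nil (by rw [hlen]; exact le_max_right _ _)]
    rfl
  | cons c w ih =>
    intro rc s hrc
    have hlen : w0.length = rc.length + 1 + w.length := by
      rw [← hrc, List.length_append, List.length_reverse, List.length_cons]; omega
    have htake : w0.take rc.length = rc.reverse := by
      rw [← hrc, ← List.length_reverse (as := rc), List.take_left]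
    have hrc' : (c :: rc).reverse ++ w = w0 := by simp [← hrc]
    by_cases hk : half ≤ rc.length
    · have hmax : max (i + (half : Int)) (i + ((rc.length : Nat) : Int))
          = i + ((rc.length : Nat) : Int) := by
        apply max_eq_right; omega
      have hcons : PySem.List.pyRange (i + ((rc.length : Nat) : Int))
          (i + ((w0.length : Nat) : Int)) 1
          = (i + ((rc.length : Nat) : Int)) ::
            PySem.List.pyRange (i + ((rc.length : Nat) : Int) + 1)
              (i + ((w0.length : Nat) : Int)) 1 :=
        PySem.List.pyRange_one_cons (by omega)
      rw [hmax, hcons, List.foldl_cons]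
      have harg : ((i + ((rc.length : Nat) : Int) - i).toNat) = rc.length := by omega
      rw [sScan, ih (c :: rc) _ hrc']
      have hmax2 : max (i + (half : Int)) (i + (((c :: rc).length : Nat) : Int))
          = i + ((rc.length : Nat) : Int) + 1 := by
        simp only [List.length_cons]
        rw [max_eq_right (by push_cast; omega)]
        push_cast; ring
      rw [hmax2]
      congr 1
      rw [harg, htake, List.reverse_reverse]
      have hc : (half : Int) ≤ ((rc.length : Nat) : Int) := by exact_mod_cast hk
      by_cases hlt : levF xs.reverse rc < s.1
      · rw [if_pos ⟨hc, hlt⟩, if_pos hlt]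
      · rw [if_neg (fun h : _ ∧ _ => hlt h.2), if_neg hlt]
    · have hmax : max (i + (half : Int)) (i + ((rc.length : Nat) : Int))
          = i + (half : Int) := by
        apply max_eq_left; omega
      have hmax2 : max (i + (half : Int)) (i + (((c :: rc).length : Nat) : Int))
          = i + (half : Int) := by
        apply max_eq_left; simp only [List.length_cons]; push_cast; omega
      rw [sScan, ih (c :: rc) _ hrc']
      rw [hmax, hmax2]
      rw [if_neg (by omega)]

theorem per_i (xs ds : List Char) (i : Int) (h0 : 0 ≤ i) (hn : i < ((ds.length : Nat) : Int))
    (s : Int × Int × Int) :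
    (PySem.List.pyRange (i + ((xs.length / 2 : Nat) : Int))
        (min ((ds.length : Nat) : Int) (i + (xs.length : Int) * 2)) 1).foldl (tryA xs ds i) s
    = ((PySem.List.enumerate (PySem.List.slice ds (some i)
          (some (min ((ds.length : Nat) : Int) (i + 2 * (xs.length : Int)))))).foldl
        (stepB xs (xs.length / 2) xs.length i)
        (s, (List.range (xs.length + 1)).map (fun (k : Nat) => (k : Int)))).1 := by
  have hh : min ((ds.length : Nat) : Int) (i + 2 * (xs.length : Int))
      = min ((ds.length : Nat) : Int) (i + (xs.length : Int) * 2) := by ring_nf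
  set hi : Int := min ((ds.length : Nat) : Int) (i + (xs.length : Int) * 2) with hhi
  have hile : i ≤ hi := by
    apply le_min (by omega) (by omega)
  have hin : hi ≤ ((ds.length : Nat) : Int) := min_le_left _ _
  set w0 : List Char := PySem.List.slice ds (some i) (some hi) with hw0
  have hw0eq : w0 = (ds.drop i.toNat).take (hi.toNat - i.toNat) :=
    PySem.List.slice_toNat ds h0 (by omega)
  have hw0len : ((w0.length : Nat) : Int) = hi - i := by
    rw [hw0eq]
    simp only [List.length_take, List.length_drop]
    omega
  -- B side
  rw [hh, row_init xs,
    show PySem.List.enumerate w0 = PySem.List.enumerate w0 ((([] : List Char).length : Nat) : Int)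
      by norm_num,
    B_scan xs (xs.length / 2) i w0 [] s]
  show _ = sScan xs (xs.length / 2) i w0 [] s
  rw [sScan_eq_fold xs (xs.length / 2) i w0 w0 [] s (by simp)]
  rw [show max (i + ((xs.length / 2 : Nat) : Int)) (i + ((([] : List Char).length : Nat) : Int))
      = i + ((xs.length / 2 : Nat) : Int) by simp; omega]
  rw [show i + ((w0.length : Nat) : Int) = hi by omega]
  -- A side: rewrite each step
  apply PySem.List.foldl_congr_mem
  intro acc j hj
  rw [PySem.List.mem_pyRange_one] at hj
  have hij : i ≤ j := by omega
  have hjhi : j ≤ hi := by omega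
  have hslice : PySem.List.slice ds (some i) (some j) = w0.take (j - i).toNat := by
    rw [PySem.List.slice_toNat ds h0 (by omega), hw0eq, List.take_take]
    congr 1
    omega
  rw [tryA_eq, hslice]

theorem find_eq_find_alt (x doc : String) : find x doc = find_alt x doc := by
  unfold find find_alt
  dsimp only
  have hst : (PySem.List.pyRange 0 ((doc.toList.length : Nat) : Int) 1).foldl
      (fun (s : Int × Int × Int) (i : Int) =>
        (PySem.List.pyRange (i + ((x.toList.length / 2 : Nat) : Int))
          (min ((doc.toList.length : Nat) : Int) (i + (x.toList.length : Int) * 2)) 1).foldl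
          (tryA x.toList doc.toList i) s)
      (((doc.toList.length : Nat) : Int), 0, 0)
      = (PySem.List.pyRange 0 ((doc.toList.length : Nat) : Int) 1).foldl
      (fun (s : Int × Int × Int) (i : Int) =>
        ((PySem.List.enumerate (PySem.List.slice doc.toList (some i)
            (some (min ((doc.toList.length : Nat) : Int) (i + 2 * (x.toList.length : Int)))))).foldl
          (stepB x.toList (x.toList.length / 2) x.toList.length i)
          (s, (List.range (x.toList.length + 1)).map (fun (k : Nat) => (k : Int)))).1)
      (((doc.toList.length : Nat) : Int), 0, 0) := by
    apply PySem.List.foldl_congr_mem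
    intro acc i hi
    rw [PySem.List.mem_pyRange_one] at hi
    exact per_i x.toList doc.toList i hi.1 hi.2 acc
  rw [hst]

-- ===== VERDICT (by name: the statement is the Claim_ definition above) =====
theorem find_spec : Claim_equal_find := by
  intro x doc _
  show find x doc = find_alt x doc
  exact find_eq_find_alt x doc
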